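-- pv_equiv track=rewrite | github.com/LaBatata101/alocacao-de-horarios-professores | alocacao.py | get_days_by_period
-- ===== SOURCE A (Python) =====
-- from typing import Any, Dict, List, Union
--
-- def get_days_by_period(semester: str, all_course_schedules: Dict[str, Dict[str, List[str]]]) -> Dict[str, List[str]]:
--     """
--     Return all days booked for one semester separeted by period.
--     """
--     days_per_period = {}
--     for name, days in all_course_schedules[semester].items():
--         name, period = name.split("_")
--         if period not in days_per_period:
--             days_per_period[period] = []
--         days_per_period[period].extend(days)
--
--     return days_per_period
-- ===== SOURCE B (Python) =====
-- def get_days_by_period(semester, all_course_schedules):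
--     """
--     Return all days booked for one semester separeted by period.
--     """
--     pairs = []
--     for name, days in all_course_schedules[semester].items():
--         name, period = name.split("_")
--         pairs.append((period, days))
--     periods = list(dict.fromkeys(period for period, _ in pairs))
--     return {p: [day for q, days in pairs if q == p for day in days]
--             for p in periods}
-- ===== Notes on version B (the rewrite author's own statement) =====
-- stated objective: alternative
-- what changed: Instead of accumulating days into a dict in one pass, B first extracts (period, days) pairs, computes the distinct periods in first-occurrence order, and builds the result per period by concatenating the days of all matching pairs.
import Mathlib
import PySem

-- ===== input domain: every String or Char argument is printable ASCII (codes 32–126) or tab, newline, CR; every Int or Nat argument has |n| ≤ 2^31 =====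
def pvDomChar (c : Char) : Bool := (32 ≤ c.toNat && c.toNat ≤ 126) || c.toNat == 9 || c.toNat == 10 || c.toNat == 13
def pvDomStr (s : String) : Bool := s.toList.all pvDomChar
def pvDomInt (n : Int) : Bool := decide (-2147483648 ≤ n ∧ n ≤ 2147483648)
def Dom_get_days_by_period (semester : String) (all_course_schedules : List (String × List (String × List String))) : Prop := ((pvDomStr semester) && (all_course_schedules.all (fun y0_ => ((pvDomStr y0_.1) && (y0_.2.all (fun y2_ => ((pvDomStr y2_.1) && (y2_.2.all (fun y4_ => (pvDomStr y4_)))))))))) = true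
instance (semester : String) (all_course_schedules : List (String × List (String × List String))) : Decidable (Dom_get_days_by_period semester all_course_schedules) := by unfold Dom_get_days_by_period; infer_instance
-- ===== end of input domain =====

-- B replaces A's one-pass dict accumulation by: extract (period, days) pairs, list the
-- distinct periods in first-occurrence order, then concatenate matching days per period
-- (objective: alternative decomposition, same cost).


-- shared by both ports: `name, period = name.split("_")` keeps the second piece
-- (exactly two pieces under Pre_; the fallback "" is never reached inside Pre_)
def pvPeriodOf (name : String) : String :=
  match PySem.Str.split? name "_" with
  | some [_, p] => p
  | _ => ""

-- ===== PORT A =====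
def get_days_by_period (semester : String) (all_course_schedules : List (String × List (String × List String))) : List (String × List String) :=
  -- all_course_schedules[semester]  (dict lookup = first match; KeyError excluded by Pre_)
  let items := ((all_course_schedules.find? (fun kv => kv.1 == semester)).map Prod.snd).getD []
  -- the loop: days_per_period starts empty; per item ensure the key, then extend
  (items.foldl
    (fun d nd =>
      let period := pvPeriodOf nd.1
      let d := if d.contains period then d else d.insert period []
      d.modify period [] (fun ds => ds ++ nd.2))
    PySem.Dict.empty).items

-- ===== PORT B =====
def get_days_by_period_alt (semester : String) (all_course_schedules : List (String × List (String × List String))) : List (String × List String) :=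
  let pairs := (((all_course_schedules.find? (fun kv => kv.1 == semester)).map Prod.snd).getD []).map
    (fun nd => (pvPeriodOf nd.1, nd.2))
  -- periods = list(dict.fromkeys(...)) : distinct periods in first-occurrence order
  let periods := PySem.List.dedup (pairs.map (·.1))
  periods.map (fun p => (p, (pairs.filter (fun q => q.1 == p)).flatMap (·.2)))

-- ===== PRECONDITION & SPEC =====
-- Pre_ excludes exactly the inputs where the Python A raises: a semester that is not a key
-- of the outer dict (KeyError) and course names that do not split on "_" into exactly two
-- pieces (ValueError on the 2-tuple unpack).
def Pre_get_days_by_period (semester : String) (all_course_schedules : List (String × List (String × List String))) : Prop :=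
  (all_course_schedules.find? (fun kv => kv.1 == semester)).isSome = true ∧
  ∀ nd ∈ (((all_course_schedules.find? (fun kv => kv.1 == semester)).map Prod.snd).getD []),
    ((PySem.Str.split? nd.1 "_").getD []).length = 2
instance (semester : String) (all_course_schedules : List (String × List (String × List String))) : Decidable (Pre_get_days_by_period semester all_course_schedules) := by unfold Pre_get_days_by_period; infer_instance

def pvWitness_get_days_by_period : String × (List (String × List (String × List String))) :=
  ("A", [("A", [("alg_1", ["mon", "tue"]), ("geo_2", ["wed"])])])

def Spec_get_days_by_period (semester : String) (all_course_schedules : List (String × List (String × List String))) (out : List (String × List String)) : Prop := out = get_days_by_period_alt semester all_course_schedules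
instance (semester : String) (all_course_schedules : List (String × List (String × List String))) (out : List (String × List String)) : Decidable (Spec_get_days_by_period semester all_course_schedules out) := by unfold Spec_get_days_by_period; infer_instance

-- ===== CLAIM (what is proved, stated in full; the proofs are below) =====
def Claim_equal_get_days_by_period : Prop := ∀ (semester : String) (all_course_schedules : List (String × List (String × List String))), Dom_get_days_by_period semester all_course_schedules → Pre_get_days_by_period semester all_course_schedules → Spec_get_days_by_period semester all_course_schedules (get_days_by_period semester all_course_schedules)

-- ===== LEMMAS AND PROOFS =====

-- A's per-item step (ensure the key, then extend) is one `modify`.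
lemma pvStepA_eq (d : PySem.Dict String (List String)) (k : String) (v : List String) :
    (if d.contains k then d else d.insert k []).modify k [] (fun ds => ds ++ v)
      = d.modify k [] (fun ds => ds ++ v) := by
  by_cases h : d.contains k = true
  · simp [h]
  · have h' : d.contains k = false := by simpa using h
    simp [h', PySem.Dict.modify, PySem.Dict.getD_insert_self,
      PySem.Dict.insert_insert_self, PySem.Dict.getD_of_not_contains d [] h']

-- value of the grouping fold at any key: the concatenation of the matching days
lemma pvGetD_fold (l : List (String × List String)) (d : PySem.Dict String (List String)) (c : String) :
    (l.foldl (fun d p => d.modify p.1 [] (fun ds => ds ++ p.2)) d).getD c []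
      = d.getD c [] ++ (l.filter (fun p => p.1 == c)).flatMap (·.2) := by
  induction l generalizing d with
  | nil => simp
  | cons p t ih =>
    simp only [List.foldl_cons, ih, PySem.Dict.getD_modify, List.filter_cons]
    by_cases h : p.1 = c
    · simp [h, List.append_assoc]
    · simp [h, Ne.symm h]

-- the whole equality, for an arbitrary items list
lemma pvMain (items : List (String × List String)) :
    (items.foldl
      (fun d nd =>
        let period := pvPeriodOf nd.1
        let d := if d.contains period then d else d.insert period []
        d.modify period [] (fun ds => ds ++ nd.2))
      PySem.Dict.empty).items
    = (PySem.List.dedup ((items.map (fun nd => (pvPeriodOf nd.1, nd.2))).map (·.1))).map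
        (fun p => (p, ((items.map (fun nd => (pvPeriodOf nd.1, nd.2))).filter
            (fun q => q.1 == p)).flatMap (·.2))) := by
  have hstep : (fun (d : PySem.Dict String (List String)) (nd : String × List String) =>
      let period := pvPeriodOf nd.1
      let d := if d.contains period then d else d.insert period []
      d.modify period [] (fun ds => ds ++ nd.2))
      = fun d nd => d.modify (pvPeriodOf nd.1) [] (fun ds => ds ++ nd.2) := by
    funext d nd
    exact pvStepA_eq d (pvPeriodOf nd.1) nd.2
  rw [hstep]
  set pairs := items.map (fun nd => (pvPeriodOf nd.1, nd.2)) with hpairs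
  have hfold : items.foldl (fun d nd => d.modify (pvPeriodOf nd.1) [] (fun ds => ds ++ nd.2)) PySem.Dict.empty
      = pairs.foldl (fun d p => d.modify p.1 [] (fun ds => ds ++ p.2)) PySem.Dict.empty := by
    rw [hpairs, List.foldl_map]
  rw [hfold]
  set D := pairs.foldl (fun d p => d.modify p.1 [] (fun ds => ds ++ p.2)) PySem.Dict.empty with hD
  have hkeys : D.keys = PySem.List.dedup (pairs.map (·.1)) := by
    rw [hD]
    have := PySem.Dict.keys_foldl_modify_key (κ := String) (ν := List String)
      pairs (fun p => p.1) [] (fun _ p => (fun ds => ds ++ p.2)) PySem.Dict.empty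
    simpa [PySem.Dict.keys_empty] using this
  have hnodup : D.keys.Nodup := by
    rw [hD]
    exact PySem.Dict.nodup_keys_foldl_modify_key pairs (fun p => p.1) []
      (fun _ p => (fun ds => ds ++ p.2)) PySem.Dict.empty (by simp [PySem.Dict.keys_empty])
  rw [PySem.Dict.items_eq_map_keys D hnodup [], hkeys]
  refine List.map_congr_left (fun p _ => ?_)
  rw [hD, pvGetD_fold]
  simp

-- ===== VERDICT (by name: the statement is the Claim_ definition above) =====
theorem get_days_by_period_spec : Claim_equal_get_days_by_period := by
  intro semester acs _ _
  unfold Spec_get_days_by_period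
  exact pvMain (((acs.find? (fun kv => kv.1 == semester)).map Prod.snd).getD [])
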